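-- pv_equiv track=rewrite | github.com/Grass-ias/Python | ListFunction.py | IsEqSet2
-- ===== SOURCE A (Python) =====
-- def FirstElmt(L):
--     if IsEmpty(L):
--         return None
--     else:
--         return L[0]
--
-- def Tail(L):
--     if IsEmpty(L):
--         return []
--     else:
--         return L[1:]
--
-- def IsEqSet2(L1,L2):
--     if IsEmpty(L1) and IsEmpty(L2):
--         return True
--     else:
--         if FirstElmt(L1) != FirstElmt(L2):
--             return False
--         else:
--             return IsEqSet2(Tail(L1),Tail(L2))
--
-- def IsEmpty(L) :
--     return L == []
-- ===== SOURCE B (Python) =====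
-- def IsEqSet2(L1, L2):
--     n = max(len(L1), len(L2))
--     for i in range(n):
--         a = L1[i] if i < len(L1) else None
--         b = L2[i] if i < len(L2) else None
--         if a != b:
--             return False
--     return True
-- ===== Notes on version B (the rewrite author's own statement) =====
-- stated objective: simpler
-- what changed: Replaced the helper-driven recursion (FirstElmt/Tail slicing) by a single iterative index loop up to max(len(L1),len(L2)) comparing None-padded elements.
import Mathlib
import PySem

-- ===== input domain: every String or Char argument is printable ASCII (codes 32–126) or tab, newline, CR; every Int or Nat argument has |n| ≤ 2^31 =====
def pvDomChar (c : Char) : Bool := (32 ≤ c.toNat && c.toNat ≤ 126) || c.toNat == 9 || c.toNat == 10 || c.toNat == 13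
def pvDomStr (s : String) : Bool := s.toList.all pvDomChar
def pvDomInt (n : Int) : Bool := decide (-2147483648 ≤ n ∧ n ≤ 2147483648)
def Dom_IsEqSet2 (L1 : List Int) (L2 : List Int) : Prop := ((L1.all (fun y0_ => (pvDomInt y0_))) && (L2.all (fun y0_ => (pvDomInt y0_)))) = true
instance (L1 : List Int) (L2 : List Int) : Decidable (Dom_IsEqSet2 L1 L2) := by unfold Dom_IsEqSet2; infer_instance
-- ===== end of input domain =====

-- B replaces A's helper-driven recursion (FirstElmt/Tail slicing) by one iterative
-- index loop over range(max(len L1, len L2)) comparing None-padded elements.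

-- ===== PORT A =====
def pvIsEmpty (L : List Int) : Bool := L = ([] : List Int)

def pvFirstElmt (L : List Int) : Option Int :=
  if pvIsEmpty L then none else L.head?

def pvTail (L : List Int) : List Int :=
  if pvIsEmpty L then [] else L.tail

def IsEqSet2 (L1 : List Int) (L2 : List Int) : Bool :=
  if pvIsEmpty L1 ∧ pvIsEmpty L2 then true
  else if pvFirstElmt L1 ≠ pvFirstElmt L2 then false
  else IsEqSet2 (pvTail L1) (pvTail L2)
termination_by L1.length + L2.length
decreasing_by
  simp only [pvIsEmpty, pvTail, decide_eq_true_eq] at *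
  rcases L1 with _ | ⟨a, t1⟩ <;> rcases L2 with _ | ⟨b, t2⟩ <;> simp_all <;> omega

-- ===== PORT B =====
-- `L[i] if i < len(L) else None`
def pvPadGet (L : List Int) (i : Nat) : Option Int :=
  if h : i < L.length then some L[i] else none

-- the `for i in range(n): … return False` loop, early return on mismatch
def pvLoopB (L1 L2 : List Int) : List Nat → Bool
  | [] => true
  | i :: rest =>
      if pvPadGet L1 i ≠ pvPadGet L2 i then false
      else pvLoopB L1 L2 rest

def IsEqSet2_alt (L1 : List Int) (L2 : List Int) : Bool :=
  pvLoopB L1 L2 (List.range (max L1.length L2.length))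

-- ===== PRECONDITION & SPEC =====
def Spec_IsEqSet2 (L1 : List Int) (L2 : List Int) (out : Bool) : Prop := out = IsEqSet2_alt L1 L2
instance (L1 : List Int) (L2 : List Int) (out : Bool) : Decidable (Spec_IsEqSet2 L1 L2 out) := by unfold Spec_IsEqSet2; infer_instance

-- ===== CLAIM (what is proved, stated in full; the proofs are below) =====
def Claim_equal_IsEqSet2 : Prop := ∀ (L1 : List Int) (L2 : List Int), Dom_IsEqSet2 L1 L2 → Spec_IsEqSet2 L1 L2 (IsEqSet2 L1 L2)

-- ===== LEMMAS AND PROOFS =====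
theorem pvPadGet_eq (L : List Int) (i : Nat) : pvPadGet L i = L[i]? := by
  unfold pvPadGet
  split
  · exact (List.getElem?_eq_getElem ‹_›).symm
  · exact (List.getElem?_eq_none (by omega)).symm

-- the loop over any index list is an `all`
theorem pvLoopB_eq_all (L1 L2 : List Int) (l : List Nat) :
    pvLoopB L1 L2 l = l.all (fun i => L1[i]? == L2[i]?) := by
  induction l with
  | nil => rfl
  | cons i rest ih =>
      simp only [pvLoopB, pvPadGet_eq, List.all_cons, ih]
      by_cases h : L1[i]? = L2[i]? <;> simp [h]

-- B decides extensional equality of the two lists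
theorem IsEqSet2_alt_eq (L1 L2 : List Int) : IsEqSet2_alt L1 L2 = decide (L1 = L2) := by
  rw [IsEqSet2_alt, pvLoopB_eq_all]
  by_cases h : L1 = L2
  · subst h; simp
  · simp only [h, decide_false]
    rw [Bool.eq_false_iff]
    intro hall
    rw [List.all_eq_true] at hall
    apply h
    apply List.ext_getElem?
    intro i
    by_cases hi : i < max L1.length L2.length
    · have := hall i (List.mem_range.mpr hi)
      simpa using this
    · have h1 : L1.length ≤ i := by omega
      have h2 : L2.length ≤ i := by omega
      simp [List.getElem?_eq_none h1, List.getElem?_eq_none h2]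

-- A decides equality of the two lists
theorem IsEqSet2_eq (L1 L2 : List Int) : IsEqSet2 L1 L2 = decide (L1 = L2) := by
  induction L1, L2 using IsEqSet2.induct with
  | case1 L1 L2 h =>
      simp only [pvIsEmpty, decide_eq_true_eq] at h
      rw [IsEqSet2]
      simp [pvIsEmpty, h.1, h.2]
  | case2 L1 L2 h hne =>
      rw [IsEqSet2]
      simp only [pvIsEmpty, decide_eq_true_eq] at h
      simp only [if_pos hne]
      rcases L1 with _ | ⟨a, t1⟩ <;> rcases L2 with _ | ⟨b, t2⟩ <;>
        simp_all [pvFirstElmt, pvIsEmpty]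
  | case3 L1 L2 h heq ih =>
      rw [IsEqSet2]
      simp only [if_neg h, if_neg heq, ih]
      rcases L1 with _ | ⟨a, t1⟩ <;> rcases L2 with _ | ⟨b, t2⟩ <;>
        simp_all [pvFirstElmt, pvTail, pvIsEmpty]

-- ===== VERDICT (by name: the statement is the Claim_ definition above) =====
theorem IsEqSet2_spec : Claim_equal_IsEqSet2 := by
  intro L1 L2 _
  unfold Spec_IsEqSet2
  rw [IsEqSet2_eq, IsEqSet2_alt_eq]
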